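-- pv_equiv track=rewrite | github.com/Wai-Theetat/OOD | Grader/03/3-2.py | get_plate_comb
-- ===== SOURCE A (Python) =====
-- def get_plate_comb(side_rq, plate_size):
-- 	limit = 5
--
-- 	def think(remain, comb, start):
-- 		if remain == 0:
-- 			return comb.copy()
-- 		if remain < 0 or len(comb) >= limit:
-- 			return None
--
-- 		for i in range(start, len(plate_size)):
-- 			plate = plate_size[i]
-- 			comb.append(plate)
-- 			result = think(remain - plate, comb, i)
-- 			if result:
-- 				return result
-- 			comb.pop()
-- 		return None
--
-- 	return think(side_rq, [], 0)
-- ===== SOURCE B (Python) =====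
-- def get_plate_comb(side_rq, plate_size):
--     limit = 5
--     stack = [(side_rq, [], 0)]
--     while stack:
--         remain, comb, start = stack.pop()
--         if remain == 0:
--             return comb
--         if remain < 0 or len(comb) >= limit:
--             continue
--         for i in range(len(plate_size) - 1, start - 1, -1):
--             stack.append((remain - plate_size[i], comb + [plate_size[i]], i))
--     return None
-- ===== Notes on version B (the rewrite author's own statement) =====
-- stated objective: alternative
-- what changed: Recursive backtracking DFS (nested function with append/pop mutation) replaced by an iterative explicit-stack DFS that pops frames (remain, comb, start) and pushes the children in reverse index order, building combinations by list concatenation instead of mutate-and-undo.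
import Mathlib
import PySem

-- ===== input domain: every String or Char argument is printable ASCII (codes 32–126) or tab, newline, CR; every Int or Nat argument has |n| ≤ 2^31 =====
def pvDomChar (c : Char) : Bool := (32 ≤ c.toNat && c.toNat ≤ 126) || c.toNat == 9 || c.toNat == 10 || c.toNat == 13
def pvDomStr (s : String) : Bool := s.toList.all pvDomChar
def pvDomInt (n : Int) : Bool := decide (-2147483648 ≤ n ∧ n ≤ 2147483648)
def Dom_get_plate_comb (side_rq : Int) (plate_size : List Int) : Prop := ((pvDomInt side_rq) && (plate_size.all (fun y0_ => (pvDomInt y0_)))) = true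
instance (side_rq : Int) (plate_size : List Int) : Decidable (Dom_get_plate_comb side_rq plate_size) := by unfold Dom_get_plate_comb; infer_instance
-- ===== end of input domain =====

-- B replaces A's recursive backtracking DFS by an iterative explicit-stack DFS (alternative
-- decomposition, same asymptotic cost); return values agree on all inputs.

-- ===== PORT A =====
-- A's nested `think` with its inner `for` loop; the loop is the mutual helper `pvLoopA`
-- (the extra proof argument `hc` only serves termination).
mutual
def pvThinkA (ps : List Int) (remain : Int) (comb : List Int) (start : Nat) : Option (List Int) :=
  if remain = 0 then some comb
  else if h : remain < 0 ∨ 5 ≤ comb.length then none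
  else pvLoopA ps remain comb start (by omega)
termination_by ((5 - comb.length : Nat), (1 : Nat), (0 : Nat))
decreasing_by
  apply Prod.Lex.right
  apply Prod.Lex.left
  omega

def pvLoopA (ps : List Int) (remain : Int) (comb : List Int) (i : Nat) (hc : comb.length < 5) : Option (List Int) :=
  if h : i < ps.length then
    -- comb.append(plate); recurse; `if result:` is Python truthiness (None and [] are falsy); comb.pop()
    match pvThinkA ps (remain - ps.getD i 0) (comb ++ [ps.getD i 0]) i with
    | some l => if l.isEmpty then pvLoopA ps remain comb (i + 1) hc else some l
    | none => pvLoopA ps remain comb (i + 1) hc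
  else none
termination_by ((5 - comb.length : Nat), (0 : Nat), ps.length - i)
decreasing_by
  all_goals first
    | (apply Prod.Lex.left; simp only [List.length_append, List.length_cons, List.length_nil]; omega)
    | (apply Prod.Lex.right; apply Prod.Lex.right; omega)
end

def get_plate_comb (side_rq : Int) (plate_size : List Int) : Option (List Int) :=
  pvThinkA plate_size side_rq [] 0

-- ===== PORT B =====
-- weight used only for termination of the stack loop
def pvW (m : Nat) (f : Int × List Int × Nat) : Nat := (m + 1) ^ (6 - f.2.1.length)

-- the frames pushed for i = len-1 .. start (popped in ascending i order; head of list = top of stack)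
def pvFrames (ps : List Int) (remain : Int) (comb : List Int) (start : Nat) : List (Int × List Int × Nat) :=
  (List.range' start (ps.length - start)).map (fun i => (remain - ps.getD i 0, comb ++ [ps.getD i 0], i))

def pvRunB (ps : List Int) (stack : List (Int × List Int × Nat)) : Option (List Int) :=
  match stack with
  | [] => none
  | (remain, comb, start) :: rest =>
    if remain = 0 then some comb
    else if h : remain < 0 ∨ 5 ≤ comb.length then pvRunB ps rest
    else pvRunB ps (pvFrames ps remain comb start ++ rest)
termination_by (stack.map (pvW ps.length)).sum
decreasing_by
  · have : 0 < pvW ps.length (remain, comb, start) := Nat.pow_pos (by omega)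
    simp [List.map_cons]
    omega
  · simp only [List.map_cons, List.sum_cons, List.map_append, List.sum_append]
    have hc : comb.length < 5 := by omega
    have h1 : (pvFrames ps remain comb start).map (pvW ps.length)
        = List.replicate (ps.length - start) ((ps.length + 1) ^ (5 - comb.length)) := by
      simp only [pvFrames, List.map_map]
      rw [List.eq_replicate_iff]
      constructor
      · simp
      · intro b hb
        simp only [List.mem_map, Function.comp] at hb
        obtain ⟨j, _, hj⟩ := hb
        rw [← hj]
        simp only [pvW]
        congr 1
        simp only [List.length_append, List.length_cons, List.length_nil]
        omega
    rw [h1, List.sum_replicate, smul_eq_mul]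
    have h2 : pvW ps.length (remain, comb, start) = (ps.length + 1) ^ (5 - comb.length) * (ps.length + 1) := by
      simp only [pvW]
      rw [← pow_succ]
      congr 1
      omega
    have h3 : 0 < (ps.length + 1) ^ (5 - comb.length) := Nat.pow_pos (by omega)
    have h4 : (ps.length - start) * ((ps.length + 1) ^ (5 - comb.length))
        < (ps.length + 1) ^ (5 - comb.length) * (ps.length + 1) := by
      rw [Nat.mul_comm (ps.length - start) ((ps.length + 1) ^ (5 - comb.length))]
      exact (Nat.mul_lt_mul_left h3).mpr (by omega)
    omega

def get_plate_comb_alt (side_rq : Int) (plate_size : List Int) : Option (List Int) :=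
  pvRunB plate_size [(side_rq, [], 0)]

-- ===== PRECONDITION & SPEC =====
def Spec_get_plate_comb (side_rq : Int) (plate_size : List Int) (out : Option (List Int)) : Prop := out = get_plate_comb_alt side_rq plate_size
instance (side_rq : Int) (plate_size : List Int) (out : Option (List Int)) : Decidable (Spec_get_plate_comb side_rq plate_size out) := by unfold Spec_get_plate_comb; infer_instance

-- ===== CLAIM (what is proved, stated in full; the proofs are below) =====
def Claim_equal_get_plate_comb : Prop := ∀ (side_rq : Int) (plate_size : List Int), Dom_get_plate_comb side_rq plate_size → Spec_get_plate_comb side_rq plate_size (get_plate_comb side_rq plate_size)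

-- ===== LEMMAS AND PROOFS =====

theorem pvRunB_nil (ps : List Int) : pvRunB ps [] = none := by
  rw [pvRunB.eq_def]

theorem pvRunB_cons (ps : List Int) (remain : Int) (comb : List Int) (start : Nat)
    (rest : List (Int × List Int × Nat)) :
    pvRunB ps ((remain, comb, start) :: rest)
      = if remain = 0 then some comb
        else if remain < 0 ∨ 5 ≤ comb.length then pvRunB ps rest
        else pvRunB ps (pvFrames ps remain comb start ++ rest) := by
  rw [pvRunB.eq_def]
  rfl

-- any `some` result of the loop is a nonempty list (it passed the truthiness test or came deeper)
theorem pvLoopA_ne_nil (ps : List Int) : ∀ (n i : Nat), ps.length - i ≤ n →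
    ∀ (remain : Int) (comb : List Int) (hc : comb.length < 5) (l : List Int),
      pvLoopA ps remain comb i hc = some l → l ≠ [] := by
  intro n
  induction n with
  | zero =>
    intro i hi remain comb hc l h
    rw [pvLoopA.eq_def, dif_neg (by omega)] at h
    cases h
  | succ n ihn =>
    intro i hi remain comb hc l h
    rw [pvLoopA.eq_def] at h
    by_cases hlt : i < ps.length
    · rw [dif_pos hlt] at h
      cases hth : pvThinkA ps (remain - ps.getD i 0) (comb ++ [ps.getD i 0]) i with
      | none =>
        simp only [hth] at h
        exact ihn (i + 1) (by omega) remain comb hc l h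
      | some l' =>
        simp only [hth] at h
        by_cases he : l'.isEmpty
        · rw [if_pos he] at h
          exact ihn (i + 1) (by omega) remain comb hc l h
        · rw [if_neg he] at h
          cases h
          simpa using he
    · rw [dif_neg hlt] at h
      cases h

-- any `some` result of think from a nonempty comb is a nonempty list
theorem pvThinkA_ne_nil (ps : List Int) (remain : Int) (comb : List Int) (start : Nat)
    (hcomb : comb ≠ []) (l : List Int) (h : pvThinkA ps remain comb start = some l) : l ≠ [] := by
  rw [pvThinkA.eq_def] at h
  by_cases h0 : remain = 0
  · rw [if_pos h0] at h
    cases h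
    exact hcomb
  · rw [if_neg h0] at h
    by_cases hg : remain < 0 ∨ 5 ≤ comb.length
    · rw [dif_pos hg] at h
      cases h
    · rw [dif_neg hg] at h
      exact pvLoopA_ne_nil ps ps.length start (by omega) remain comb (by omega) l h

-- the stack machine processes the top frame exactly as A's recursive search does
theorem pvMain (ps : List Int) : ∀ (d : Nat) (remain : Int) (comb : List Int) (start : Nat)
    (rest : List (Int × List Int × Nat)), 5 - comb.length ≤ d →
    pvRunB ps ((remain, comb, start) :: rest)
      = (match pvThinkA ps remain comb start with
          | some l => some l
          | none => pvRunB ps rest) := by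
  intro d
  induction d with
  | zero =>
    intro remain comb start rest hd
    rw [pvRunB_cons, pvThinkA.eq_def]
    by_cases h0 : remain = 0
    · simp [h0]
    · rw [if_neg h0, if_neg h0, if_pos (Or.inr (by omega)), dif_pos (Or.inr (by omega))]
  | succ d ihd =>
    intro remain comb start rest hd
    rw [pvRunB_cons, pvThinkA.eq_def]
    by_cases h0 : remain = 0
    · simp [h0]
    · rw [if_neg h0, if_neg h0]
      by_cases hg : remain < 0 ∨ 5 ≤ comb.length
      · rw [if_pos hg, dif_pos hg]
      · rw [if_neg hg, dif_neg hg]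
        have hc : comb.length < 5 := by omega
        have loopMain : ∀ (n i : Nat), ps.length - i ≤ n → ∀ (rest' : List (Int × List Int × Nat)),
            pvRunB ps (((List.range' i (ps.length - i)).map
                (fun j => (remain - ps.getD j 0, comb ++ [ps.getD j 0], j))) ++ rest')
              = (match pvLoopA ps remain comb i hc with
                  | some l => some l
                  | none => pvRunB ps rest') := by
          intro n
          induction n with
          | zero =>
            intro i hi rest'
            have hz : ps.length - i = 0 := by omega
            rw [hz, pvLoopA.eq_def, dif_neg (by omega)]
            simp [List.range']
          | succ n ihn =>
            intro i hi rest'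
            by_cases hlt : i < ps.length
            · have hcnt : ps.length - i = (ps.length - (i + 1)) + 1 := by omega
              rw [hcnt, List.range'_succ, List.map_cons, List.cons_append]
              rw [ihd (remain - ps.getD i 0) (comb ++ [ps.getD i 0]) i _ (by simp; omega)]
              rw [pvLoopA.eq_def, dif_pos hlt]
              cases hth : pvThinkA ps (remain - ps.getD i 0) (comb ++ [ps.getD i 0]) i with
              | some l =>
                have hne : l ≠ [] := pvThinkA_ne_nil ps _ _ i (by simp) l hth
                simp only [hth]
                rw [if_neg (by simpa using hne)]
              | none =>
                simp only [hth]
                exact ihn (i + 1) (by omega) rest'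
            · have hz : ps.length - i = 0 := by omega
              rw [hz, pvLoopA.eq_def, dif_neg hlt]
              simp [List.range']
        have := loopMain ps.length start (by omega) rest
        rw [pvFrames]
        exact this

-- ===== VERDICT (by name: the statement is the Claim_ definition above) =====
theorem get_plate_comb_spec : Claim_equal_get_plate_comb := by
  intro side_rq plate_size _
  unfold Spec_get_plate_comb get_plate_comb get_plate_comb_alt
  rw [pvMain plate_size 5 side_rq [] 0 [] (by simp)]
  cases h : pvThinkA plate_size side_rq [] 0 with
  | some l => rfl
  | none => simp [pvRunB_nil]
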